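-- pv_equiv track=rewrite | github.com/stooiyaren/stooiyaren | SWEA/D3/6190. 정곤이의 단조 증가하는 수/정곤이의 단조 증가하는 수.py | danzo
-- ===== SOURCE A (Python) =====
-- def danzo(n):
--     while n >9:
--         a = n%10
--         b = n//10 %10
--         if b>a:
--             return 0
--         n //= 10
--     return 1
-- ===== SOURCE B (Python) =====
-- def danzo(n):
--     if n < 10:
--         return 1
--     digits = []
--     while n:
--         digits.append(n % 10)
--         n //= 10
--     digits.reverse()
--     return 1 if digits == sorted(digits) else 0
-- ===== Notes on version B (the rewrite author's own statement) =====
-- stated objective: alternative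
-- what changed: Replaces A's in-place modular scan with early return by extracting the digit list once and comparing it to its sorted copy (plus an explicit n<10 fast path covering single digits and negatives).
import Mathlib
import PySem

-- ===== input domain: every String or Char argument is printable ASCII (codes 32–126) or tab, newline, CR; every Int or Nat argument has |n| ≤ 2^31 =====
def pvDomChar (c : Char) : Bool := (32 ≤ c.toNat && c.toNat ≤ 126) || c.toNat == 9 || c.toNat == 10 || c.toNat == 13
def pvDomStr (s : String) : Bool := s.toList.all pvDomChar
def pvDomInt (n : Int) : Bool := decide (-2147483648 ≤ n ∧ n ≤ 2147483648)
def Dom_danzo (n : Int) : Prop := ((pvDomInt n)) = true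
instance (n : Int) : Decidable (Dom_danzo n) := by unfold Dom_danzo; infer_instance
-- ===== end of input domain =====

-- B checks digit-list == sorted(digit-list) instead of A's modular scan; same result, different strategy.
-- Termination helper for the ports (floor-division by 10 shrinks a positive Int).
theorem pvFdiv10_lt (n : Int) (h : 0 < n) : (PySem.Int.floordiv n 10).toNat < n.toNat := by
  simp only [PySem.Int.floordiv]
  rw [Int.fdiv_eq_ediv]
  simp only [show (0:Int) ≤ 10 ∨ (10:Int) ∣ n from Or.inl (by norm_num), if_pos]
  omega

-- ===== PORT A =====
def danzo (n : Int) : Int :=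
  if n > 9 then
    let a := PySem.Int.mod n 10
    let b := PySem.Int.mod (PySem.Int.floordiv n 10) 10
    if b > a then 0 else danzo (PySem.Int.floordiv n 10)
  else 1
termination_by n.toNat
decreasing_by exact pvFdiv10_lt n (by omega)

-- ===== PORT B =====
-- the `while n:` digit-extraction loop of Source B (only ever entered with 0 < n; the
-- positivity guard makes the recursion total)
def pvDigits (n : Int) : List Int :=
  if 0 < n then PySem.Int.mod n 10 :: pvDigits (PySem.Int.floordiv n 10) else []
termination_by n.toNat
decreasing_by exact pvFdiv10_lt n (by omega)

def danzo_alt (n : Int) : Int :=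
  if n < 10 then 1
  else
    let ds := (pvDigits n).reverse
    if ds = PySem.List.sorted ds (fun x => x) then 1 else 0

-- ===== PRECONDITION & SPEC =====
def Spec_danzo (n : Int) (out : Int) : Prop := out = danzo_alt n
instance (n : Int) (out : Int) : Decidable (Spec_danzo n out) := by unfold Spec_danzo; infer_instance

-- ===== CLAIM (what is proved, stated in full; the proofs are below) =====
def Claim_equal_danzo : Prop := ∀ (n : Int), Dom_danzo n → Spec_danzo n (danzo n)

-- ===== LEMMAS AND PROOFS =====

theorem pvFmod10 (n : Int) : PySem.Int.mod n 10 = n % 10 := by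
  simp only [PySem.Int.mod]
  rw [Int.fmod_eq_emod]
  simp only [show (0:Int) ≤ 10 ∨ (10:Int) ∣ n from Or.inl (by norm_num), if_pos]
  ring

theorem pvFdiv10 (n : Int) : PySem.Int.floordiv n 10 = n / 10 := by
  simp only [PySem.Int.floordiv]
  rw [Int.fdiv_eq_ediv]
  simp only [show (0:Int) ≤ 10 ∨ (10:Int) ∣ n from Or.inl (by norm_num), if_pos]
  ring

theorem pvDigits_pos (n : Int) (h : 0 < n) :
    pvDigits n = n % 10 :: pvDigits (n / 10) := by
  rw [pvDigits, if_pos h, pvFmod10, pvFdiv10]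

theorem pvDigits_small (n : Int) (h0 : 0 < n) (h9 : n ≤ 9) : pvDigits n = [n % 10] := by
  rw [pvDigits_pos n h0]
  have : n / 10 = 0 := by omega
  rw [this, pvDigits, if_neg (by omega)]

-- A's scan computes exactly the "each more-significant digit ≤ its neighbour" chain test
theorem danzo_chain (n : Int) (h : 0 < n) :
    danzo n = if List.IsChain (fun a b => b ≤ a) (pvDigits n) then 1 else 0 := by
  by_cases h9 : n > 9
  · have hq : 0 < n / 10 := by omega
    have hchain : List.IsChain (fun a b : Int => b ≤ a) (pvDigits n) ↔
        (n / 10) % 10 ≤ n % 10 ∧ List.IsChain (fun a b : Int => b ≤ a) (pvDigits (n / 10)) := by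
      rw [pvDigits_pos n h, pvDigits_pos (n / 10) hq, List.isChain_cons_cons,
        ← pvDigits_pos (n / 10) hq]
    rw [danzo]
    simp only [if_pos h9, pvFmod10, pvFdiv10]
    by_cases hgt : (n / 10) % 10 > n % 10
    · rw [if_pos hgt, if_neg (fun hc => absurd (hchain.mp hc).1 (by omega))]
    · rw [if_neg hgt, danzo_chain (n / 10) hq]
      by_cases hc : List.IsChain (fun a b : Int => b ≤ a) (pvDigits (n / 10))
      · rw [if_pos hc, if_pos (hchain.mpr ⟨by omega, hc⟩)]
      · rw [if_neg hc, if_neg (fun hcc => hc (hchain.mp hcc).2)]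
  · rw [danzo, if_neg h9, pvDigits_small n h (by omega)]
    simp
termination_by n.toNat
decreasing_by omega

-- a list equals its Python sort iff it is already pairwise nondecreasing
theorem eq_sorted_iff (ds : List Int) :
    (ds = PySem.List.sorted ds (fun x => x)) ↔ List.Pairwise (· ≤ ·) ds := by
  constructor
  · intro h
    have := PySem.List.sorted_pairwise ds (fun x => x)
    rw [← h] at this
    exact this
  · intro h
    exact (PySem.List.sorted_eq_self_of_pairwise ds (fun x => x) h).symm

-- ===== VERDICT (by name: the statement is the Claim_ definition above) =====
theorem danzo_spec : Claim_equal_danzo := by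
  intro n _
  unfold Spec_danzo danzo_alt
  by_cases h10 : n < 10
  · rw [danzo, if_neg (by omega), if_pos h10]
  · rw [if_neg h10]
    have h0 : 0 < n := by omega
    rw [danzo_chain n h0]
    have hiff : ((pvDigits n).reverse = PySem.List.sorted (pvDigits n).reverse (fun x => x)) ↔
        List.IsChain (fun a b : Int => b ≤ a) (pvDigits n) := by
      rw [eq_sorted_iff, ← List.isChain_iff_pairwise, List.isChain_reverse]
    by_cases hc : List.IsChain (fun a b : Int => b ≤ a) (pvDigits n)
    · rw [if_pos hc, if_pos (hiff.mpr hc)]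
    · rw [if_neg hc, if_neg (fun hs => hc (hiff.mp hs))]
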